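-- pv_equiv track=rewrite | github.com/cauamapurunga/identificador_placas | main.py | identificar_estado
-- ===== SOURCE A (Python) =====
-- def identificar_estado(placa):
--     estados = {
--         "Ceará": [
--             ("HTX", "HZA"), ("NQL", "NRE"), ("NUM", "NVF"),
--             ("OCB", "OCU"), ("OHX", "OIQ"), ("ORN", "OSV"),
--             ("OZA", "OZA"), ("PMA", "POZ"), ("RIA", "RIN"),
--             ("SAN", "SBV")
--         ],
--         "Maranhão": [
--             ("HOL", "HQE"), ("NHA", "NHT"), ("NMP", "NNI"),
--             ("NWS", "NXQ"), ("OIR", "OJQ"), ("OXQ", "OXZ"),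
--             ("PSA", "PTZ"), ("ROA", "ROZ")
--         ],
--         "Piauí": [
--             ("LVF", "LWQ"), ("NHU", "NIX"), ("ODU", "OEI"),
--             ("OUA", "OUE"), ("OVW", "OVY"), ("PIA", "PIZ"),
--             ("QRN", "QRZ"), ("RSG", "RST")
--         ]
--     }
--
--     for estado, intervalo in estados.items():
--         for inicio, fim in intervalo:
--             if inicio <= placa[:3] <= fim:
--                 return estado
--
--     return "Desconhecido"
-- ===== SOURCE B (Python) =====
-- # Same result as A, but via one flat table of (inicio, fim, estado) triples
-- # kept sorted by inicio, and a binary search instead of scanning every interval.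
-- # The intervals are pairwise disjoint, so the one candidate found by the
-- # search is the only interval that can contain the prefix.
--
-- _TRIPLOS = [
--     ("HOL", "HQE", "Maranhão"), ("HTX", "HZA", "Ceará"), ("LVF", "LWQ", "Piauí"),
--     ("NHA", "NHT", "Maranhão"), ("NHU", "NIX", "Piauí"), ("NMP", "NNI", "Maranhão"),
--     ("NQL", "NRE", "Ceará"), ("NUM", "NVF", "Ceará"), ("NWS", "NXQ", "Maranhão"),
--     ("OCB", "OCU", "Ceará"), ("ODU", "OEI", "Piauí"), ("OHX", "OIQ", "Ceará"),
--     ("OIR", "OJQ", "Maranhão"), ("ORN", "OSV", "Ceará"), ("OUA", "OUE", "Piauí"),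
--     ("OVW", "OVY", "Piauí"), ("OXQ", "OXZ", "Maranhão"), ("OZA", "OZA", "Ceará"),
--     ("PIA", "PIZ", "Piauí"), ("PMA", "POZ", "Ceará"), ("PSA", "PTZ", "Maranhão"),
--     ("QRN", "QRZ", "Piauí"), ("RIA", "RIN", "Ceará"), ("ROA", "ROZ", "Maranhão"),
--     ("RSG", "RST", "Piauí"), ("SAN", "SBV", "Ceará"),
-- ]
--
-- _INICIOS = [t[0] for t in _TRIPLOS]
--
--
-- def identificar_estado(placa):
--     p = placa[:3]
--     # binary search: lo ends as the number of inicios <= p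
--     lo, hi = 0, len(_INICIOS)
--     while lo < hi:
--         mid = (lo + hi) // 2
--         if _INICIOS[mid] <= p:
--             lo = mid + 1
--         else:
--             hi = mid
--     if lo > 0 and p <= _TRIPLOS[lo - 1][1]:
--         return _TRIPLOS[lo - 1][2]
--     return "Desconhecido"
-- ===== Notes on version B (the rewrite author's own statement) =====
-- stated objective: alternative
-- what changed: Replaces A's nested linear scan of the per-state interval dict by one flat table of (inicio, fim, estado) triples kept sorted by inicio, and a hand-written binary search on the inicios that checks a single candidate interval (correct because the intervals are pairwise disjoint).
import Mathlib
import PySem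

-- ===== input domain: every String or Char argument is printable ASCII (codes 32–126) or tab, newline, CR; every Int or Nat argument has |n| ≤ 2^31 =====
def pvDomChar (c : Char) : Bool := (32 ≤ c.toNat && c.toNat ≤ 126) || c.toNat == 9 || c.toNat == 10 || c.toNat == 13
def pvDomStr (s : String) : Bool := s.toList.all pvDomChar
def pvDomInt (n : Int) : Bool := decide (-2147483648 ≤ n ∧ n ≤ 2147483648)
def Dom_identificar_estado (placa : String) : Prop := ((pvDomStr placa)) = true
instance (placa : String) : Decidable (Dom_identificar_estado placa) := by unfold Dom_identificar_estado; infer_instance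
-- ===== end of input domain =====

-- B replaces A's linear scan of all 26 intervals by one flattened list of triples
-- sorted by inicio plus a hand-written binary search (same return value).
-- (Python string comparison is ported as '≤'/'<' on .toList, per PYSEM.md.)

-- ===== PORT A =====
def estadosA : List (String × List (String × String)) :=
  [("Ceará",
    [("HTX", "HZA"), ("NQL", "NRE"), ("NUM", "NVF"),
     ("OCB", "OCU"), ("OHX", "OIQ"), ("ORN", "OSV"),
     ("OZA", "OZA"), ("PMA", "POZ"), ("RIA", "RIN"),
     ("SAN", "SBV")]),
   ("Maranhão",
    [("HOL", "HQE"), ("NHA", "NHT"), ("NMP", "NNI"),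
     ("NWS", "NXQ"), ("OIR", "OJQ"), ("OXQ", "OXZ"),
     ("PSA", "PTZ"), ("ROA", "ROZ")]),
   ("Piauí",
    [("LVF", "LWQ"), ("NHU", "NIX"), ("ODU", "OEI"),
     ("OUA", "OUE"), ("OVW", "OVY"), ("PIA", "PIZ"),
     ("QRN", "QRZ"), ("RSG", "RST")])]

-- inner 'for inicio, fim in intervalo' loop with early return
def innerA (p : List Char) (estado : String) : List (String × String) → Option String
  | [] => none
  | (inicio, fim) :: rest =>
      if inicio.toList ≤ p ∧ p ≤ fim.toList then some estado else innerA p estado rest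

-- outer 'for estado, intervalo in estados.items()' loop
def outerA (p : List Char) : List (String × List (String × String)) → String
  | [] => "Desconhecido"
  | (estado, intervalo) :: rest =>
      match innerA p estado intervalo with
      | some r => r
      | none => outerA p rest

def identificar_estado (placa : String) : String :=
  outerA (PySem.Str.slice placa none (some 3)).toList estadosA

-- ===== PORT B =====
-- _TRIPLOS: flat (inicio, fim, estado) table, kept sorted by inicio
def triplosB : List (String × String × String) :=
  [("HOL", "HQE", "Maranhão"), ("HTX", "HZA", "Ceará"), ("LVF", "LWQ", "Piauí"),
   ("NHA", "NHT", "Maranhão"), ("NHU", "NIX", "Piauí"), ("NMP", "NNI", "Maranhão"),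
   ("NQL", "NRE", "Ceará"), ("NUM", "NVF", "Ceará"), ("NWS", "NXQ", "Maranhão"),
   ("OCB", "OCU", "Ceará"), ("ODU", "OEI", "Piauí"), ("OHX", "OIQ", "Ceará"),
   ("OIR", "OJQ", "Maranhão"), ("ORN", "OSV", "Ceará"), ("OUA", "OUE", "Piauí"),
   ("OVW", "OVY", "Piauí"), ("OXQ", "OXZ", "Maranhão"), ("OZA", "OZA", "Ceará"),
   ("PIA", "PIZ", "Piauí"), ("PMA", "POZ", "Ceará"), ("PSA", "PTZ", "Maranhão"),
   ("QRN", "QRZ", "Piauí"), ("RIA", "RIN", "Ceará"), ("ROA", "ROZ", "Maranhão"),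
   ("RSG", "RST", "Piauí"), ("SAN", "SBV", "Ceará")]

-- _INICIOS
def iniciosB : List String := triplosB.map (fun t => t.1)

-- the hand-written 'while lo < hi' binary search of Source B
-- (the index mid is always < xs.length when read; getD's default is never used)
def bsearchB (p : List Char) (xs : List String) (lo hi : Nat) : Nat :=
  if _h : lo < hi then
    let mid := (lo + hi) / 2
    if (xs.getD mid "").toList ≤ p then bsearchB p xs (mid + 1) hi
    else bsearchB p xs lo mid
  else lo
termination_by hi - lo
decreasing_by all_goals omega

def identificar_estado_alt (placa : String) : String :=
  let p := (PySem.Str.slice placa none (some 3)).toList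
  let lo := bsearchB p iniciosB 0 iniciosB.length
  if 0 < lo ∧ p ≤ (triplosB.getD (lo - 1) ("", "", "")).2.1.toList then
    (triplosB.getD (lo - 1) ("", "", "")).2.2
  else "Desconhecido"

-- ===== PRECONDITION & SPEC =====
def Spec_identificar_estado (placa : String) (out : String) : Prop := out = identificar_estado_alt placa
instance (placa : String) (out : String) : Decidable (Spec_identificar_estado placa out) := by unfold Spec_identificar_estado; infer_instance

-- ===== CLAIM (what is proved, stated in full; the proofs are below) =====
def Claim_equal_identificar_estado : Prop := ∀ (placa : String), Dom_identificar_estado placa → Spec_identificar_estado placa (identificar_estado placa)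

-- ===== LEMMAS AND PROOFS =====

lemma triplos_len : triplosB.length = 26 := rfl

lemma inicios_len : iniciosB.length = 26 := rfl

lemma inicios_getD (j : Nat) (h : j < 26) :
    (iniciosB.getD j "").toList = (triplosB[j]'(by rw [triplos_len]; exact h)).1.toList := by
  unfold iniciosB
  rw [List.getD_eq_getElem _ _ (by simpa using h), List.getElem_map]

-- in sorted order each fim lies strictly below every later inicio (the intervals are disjoint)
lemma chain_idx : ∀ a b (ha : a < 26) (hb : b < 26), a < b →
    (triplosB[a]'(by rw [triplos_len]; exact ha)).2.1.toList <
    (triplosB[b]'(by rw [triplos_len]; exact hb)).1.toList := by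
  have h : triplosB.Pairwise (fun s t => s.2.1.toList < t.1.toList) := by decide
  rw [List.pairwise_iff_getElem] at h
  intro a b ha hb hab
  exact h a b (by rw [triplos_len]; exact ha) (by rw [triplos_len]; exact hb) hab

lemma inicios_mono : ∀ i j, i < j → j < iniciosB.length →
    (iniciosB.getD i "").toList ≤ (iniciosB.getD j "").toList := by
  have h : iniciosB.Pairwise (fun s t => s.toList ≤ t.toList) := by decide
  rw [List.pairwise_iff_getElem] at h
  intro i j hij hj
  rw [List.getD_eq_getElem _ _ (by omega), List.getD_eq_getElem _ _ hj]
  exact h i j (by omega) hj hij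

-- binary-search invariant: the result splits [lo, hi) into values ≤ p and values > p
lemma bsearchB_spec (p : List Char) (xs : List String)
    (hmono : ∀ i j, i < j → j < xs.length →
      (xs.getD i "").toList ≤ (xs.getD j "").toList) :
    ∀ n lo hi, hi - lo ≤ n → lo ≤ hi → hi ≤ xs.length →
      lo ≤ bsearchB p xs lo hi ∧ bsearchB p xs lo hi ≤ hi ∧
      (∀ j, lo ≤ j → j < bsearchB p xs lo hi → (xs.getD j "").toList ≤ p) ∧
      (∀ j, bsearchB p xs lo hi ≤ j → j < hi → p < (xs.getD j "").toList) := by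
  intro n
  induction n with
  | zero =>
    intro lo hi h1 h2 h3
    have he : hi = lo := by omega
    subst he
    rw [bsearchB, dif_neg (by omega)]
    exact ⟨le_refl _, le_refl _, fun j hj1 hj2 => by omega,
           fun j hj1 hj2 => by exfalso; omega⟩
  | succ n ih =>
    intro lo hi h1 h2 h3
    by_cases hlt : lo < hi
    · have hB : bsearchB p xs lo hi =
          if (xs.getD ((lo + hi) / 2) "").toList ≤ p then bsearchB p xs ((lo + hi) / 2 + 1) hi
          else bsearchB p xs lo ((lo + hi) / 2) := by
        rw [bsearchB, dif_pos hlt]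
      rw [hB]
      by_cases hc : (xs.getD ((lo + hi) / 2) "").toList ≤ p
      · rw [if_pos hc]
        obtain ⟨ha, hb, hcc, hd⟩ := ih ((lo + hi) / 2 + 1) hi (by omega) (by omega) h3
        refine ⟨by omega, hb, ?_, hd⟩
        intro j hj1 hj2
        rcases Nat.lt_trichotomy j ((lo + hi) / 2) with hj | hj | hj
        · exact le_trans (hmono j ((lo + hi) / 2) hj (by omega)) hc
        · subst hj; exact hc
        · exact hcc j (by omega) hj2
      · rw [if_neg hc]
        rw [not_le] at hc
        obtain ⟨ha, hb, hcc, hd⟩ := ih lo ((lo + hi) / 2) (by omega) (by omega) (by omega)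
        refine ⟨ha, by omega, hcc, ?_⟩
        intro j hj1 hj2
        rcases Nat.lt_trichotomy j ((lo + hi) / 2) with hj | hj | hj
        · exact hd j hj1 hj
        · subst hj; exact hc
        · exact lt_of_lt_of_le hc (hmono ((lo + hi) / 2) j hj (by omega))
    · rw [bsearchB, dif_neg hlt]
      exact ⟨le_refl _, h2, fun j hj1 hj2 => by omega,
             fun j hj1 hj2 => by exfalso; omega⟩

-- A's inner loop: no match anywhere in ivs gives none …
lemma innerA_none (p : List Char) (e : String) (ivs : List (String × String))
    (h : ∀ i f, (i, f) ∈ ivs → ¬(i.toList ≤ p ∧ p ≤ f.toList)) :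
    innerA p e ivs = none := by
  induction ivs with
  | nil => rfl
  | cons iv rest ihr =>
    obtain ⟨i, f⟩ := iv
    rw [innerA, if_neg (h i f (List.mem_cons_self))]
    exact ihr (fun i' f' hm => h i' f' (List.mem_cons_of_mem _ hm))

-- … none means no match in ivs …
lemma innerA_none_mem (p : List Char) (e : String) (ivs : List (String × String))
    (h : innerA p e ivs = none) :
    ∀ i f, (i, f) ∈ ivs → ¬(i.toList ≤ p ∧ p ≤ f.toList) := by
  induction ivs with
  | nil => intro i f hm; simp at hm
  | cons iv rest ihr =>
    obtain ⟨i0, f0⟩ := iv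
    rw [innerA] at h
    by_cases hc : i0.toList ≤ p ∧ p ≤ f0.toList
    · rw [if_pos hc] at h; exact absurd h (by simp)
    · rw [if_neg hc] at h
      intro i f hm
      rcases List.mem_cons.mp hm with heq | hm'
      · obtain ⟨h1, h2⟩ := Prod.mk.injEq .. ▸ heq
        exact h1 ▸ h2 ▸ hc
      · exact ihr h i f hm'

-- … and some s reports the estado of a matching interval
lemma innerA_some (p : List Char) (e : String) (ivs : List (String × String)) (s : String)
    (h : innerA p e ivs = some s) :
    s = e ∧ ∃ i f, (i, f) ∈ ivs ∧ i.toList ≤ p ∧ p ≤ f.toList := by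
  induction ivs with
  | nil => simp [innerA] at h
  | cons iv rest ihr =>
    obtain ⟨i, f⟩ := iv
    rw [innerA] at h
    by_cases hc : i.toList ≤ p ∧ p ≤ f.toList
    · rw [if_pos hc] at h
      exact ⟨(Option.some.injEq _ _ ▸ h).symm, i, f, List.mem_cons_self, hc⟩
    · rw [if_neg hc] at h
      obtain ⟨hs, i', f', hm, hc'⟩ := ihr h
      exact ⟨hs, i', f', List.mem_cons_of_mem _ hm, hc'⟩

lemma outerA_none (p : List Char) (L : List (String × List (String × String)))
    (h : ∀ e ivs, (e, ivs) ∈ L → ∀ i f, (i, f) ∈ ivs → ¬(i.toList ≤ p ∧ p ≤ f.toList)) :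
    outerA p L = "Desconhecido" := by
  induction L with
  | nil => rfl
  | cons hd rest ihr =>
    obtain ⟨e, ivs⟩ := hd
    rw [outerA, innerA_none p e ivs (h e ivs List.mem_cons_self)]
    exact ihr (fun e' ivs' hm => h e' ivs' (List.mem_cons_of_mem _ hm))

lemma outerA_found (p : List Char) (L : List (String × List (String × String))) (e0 : String)
    (hex : ∃ e ivs, (e, ivs) ∈ L ∧ ∃ i f, (i, f) ∈ ivs ∧ i.toList ≤ p ∧ p ≤ f.toList)
    (huni : ∀ e ivs, (e, ivs) ∈ L → ∀ i f, (i, f) ∈ ivs →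
      i.toList ≤ p ∧ p ≤ f.toList → e = e0) :
    outerA p L = e0 := by
  induction L with
  | nil => obtain ⟨e, ivs, hm, _⟩ := hex; simp at hm
  | cons hd rest ihr =>
    obtain ⟨e, ivs⟩ := hd
    rw [outerA]
    cases hi : innerA p e ivs with
    | some s =>
      obtain ⟨hs, i, f, hm, hc⟩ := innerA_some p e ivs s hi
      rw [hs]
      exact huni e ivs List.mem_cons_self i f hm hc
    | none =>
      apply ihr
      · obtain ⟨e', ivs', hm, i, f, hmi, hc⟩ := hex
        rcases List.mem_cons.mp hm with heq | hm'
        · exfalso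
          obtain ⟨h1, h2⟩ := Prod.mk.injEq .. ▸ heq
          rw [← h1, ← h2] at hi
          exact innerA_none_mem p e' ivs' hi i f hmi hc
        · exact ⟨e', ivs', hm', i, f, hmi, hc⟩
      · exact fun e' ivs' hm => huni e' ivs' (List.mem_cons_of_mem _ hm)

-- grouped/flattened membership bridges
lemma flat_of_grouped (L : List (String × List (String × String)))
    (e : String) (ivs : List (String × String)) (i f : String)
    (hm : (e, ivs) ∈ L) (hmi : (i, f) ∈ ivs) :
    (i, f, e) ∈ L.flatMap (fun ei => ei.2.map (fun iv => (iv.1, iv.2, ei.1))) :=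
  List.mem_flatMap.mpr ⟨(e, ivs), hm, List.mem_map.mpr ⟨(i, f), hmi, rfl⟩⟩

lemma grouped_of_flat (L : List (String × List (String × String))) (i f e : String)
    (h : (i, f, e) ∈ L.flatMap (fun ei => ei.2.map (fun iv => (iv.1, iv.2, ei.1)))) :
    ∃ ivs, (e, ivs) ∈ L ∧ (i, f) ∈ ivs := by
  obtain ⟨⟨e', ivs⟩, hmL, hmm⟩ := List.mem_flatMap.mp h
  obtain ⟨iv, hiv, heq⟩ := List.mem_map.mp hmm
  obtain ⟨h1, h2, h3⟩ : iv.1 = i ∧ iv.2 = f ∧ e' = e := by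
    simpa [Prod.ext_iff] using heq
  subst h3
  refine ⟨ivs, hmL, ?_⟩
  rw [← h1, ← h2]
  exact hiv

lemma flatA_perm :
    (estadosA.flatMap (fun ei => ei.2.map (fun iv => (iv.1, iv.2, ei.1)))).Perm triplosB := by
  decide

-- the heart of the equivalence: on any prefix p, A's scan equals B's search result
lemma core (placa : String) : identificar_estado placa = identificar_estado_alt placa := by
  unfold identificar_estado identificar_estado_alt
  show outerA (PySem.Str.slice placa none (some 3)).toList estadosA =
    (if 0 < bsearchB (PySem.Str.slice placa none (some 3)).toList iniciosB 0 iniciosB.length ∧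
        (PySem.Str.slice placa none (some 3)).toList ≤
          (triplosB.getD (bsearchB (PySem.Str.slice placa none (some 3)).toList iniciosB 0
            iniciosB.length - 1) ("", "", "")).2.1.toList then
      (triplosB.getD (bsearchB (PySem.Str.slice placa none (some 3)).toList iniciosB 0
        iniciosB.length - 1) ("", "", "")).2.2
    else "Desconhecido")
  set p := (PySem.Str.slice placa none (some 3)).toList with hp
  obtain ⟨hk0, hk26, hlow, hhigh⟩ :=
    bsearchB_spec p iniciosB inicios_mono 26 0 iniciosB.length
      (by rw [inicios_len]) (by omega) (le_refl _)
  set k := bsearchB p iniciosB 0 iniciosB.length with hkdef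
  rw [inicios_len] at hk26
  have hkm1 : k - 1 < 26 := by omega
  -- any matching interval sits exactly at sorted position k-1
  have hloc : ∀ i f e,
      (i, f, e) ∈ estadosA.flatMap (fun ei => ei.2.map (fun iv => (iv.1, iv.2, ei.1))) →
      i.toList ≤ p → p ≤ f.toList →
      0 < k ∧ (triplosB[k - 1]'(by rw [triplos_len]; exact hkm1)) = (i, f, e) := by
    intro i f e hm h1 h2
    have hmS : (i, f, e) ∈ triplosB := flatA_perm.mem_iff.mp hm
    obtain ⟨j, hj, hjE⟩ := List.mem_iff_getElem.mp hmS
    have hj26 : j < 26 := by rw [triplos_len] at hj; exact hj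
    by_cases hjk : k ≤ j
    · exfalso
      have := hhigh j hjk (by rw [inicios_len]; exact hj26)
      rw [inicios_getD j hj26, hjE] at this
      exact absurd h1 (not_le.mpr this)
    · rw [not_le] at hjk
      have hkpos : 0 < k := by omega
      by_cases hjk1 : j < k - 1
      · exfalso
        have hch := chain_idx j (k - 1) hj26 hkm1 hjk1
        have hle := hlow (k - 1) (Nat.zero_le _) (by omega)
        rw [inicios_getD (k - 1) hkm1] at hle
        rw [hjE] at hch
        exact absurd h2 (not_le.mpr (lt_of_lt_of_le hch hle))
      · have hje : j = k - 1 := by omega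
        subst hje
        exact ⟨hkpos, hjE⟩
  have hgd : triplosB.getD (k - 1) ("", "", "") =
      triplosB[k - 1]'(by rw [triplos_len]; exact hkm1) := by
    rw [List.getD_eq_getElem _ _ (by rw [triplos_len]; exact hkm1)]
  by_cases hk : 0 < k
  · by_cases hf : p ≤ (triplosB[k - 1]'(by rw [triplos_len]; exact hkm1)).2.1.toList
    · rw [hgd, if_pos ⟨hk, hf⟩]
      set t := triplosB[k - 1]'(by rw [triplos_len]; exact hkm1) with htdef
      have ht1 : t.1.toList ≤ p := by
        have := hlow (k - 1) (Nat.zero_le _) (by omega)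
        rw [inicios_getD (k - 1) hkm1] at this
        exact this
      have htm : (t.1, t.2.1, t.2.2) ∈
          estadosA.flatMap (fun ei => ei.2.map (fun iv => (iv.1, iv.2, ei.1))) :=
        flatA_perm.mem_iff.mpr (htdef ▸ List.getElem_mem _)
      obtain ⟨ivs, hmL, hmi⟩ := grouped_of_flat estadosA t.1 t.2.1 t.2.2 htm
      apply outerA_found
      · exact ⟨t.2.2, ivs, hmL, t.1, t.2.1, hmi, ht1, hf⟩
      · intro e ivs' hm i f hmi' hc
        obtain ⟨_, hE⟩ := hloc i f e (flat_of_grouped estadosA e ivs' i f hm hmi') hc.1 hc.2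
        rw [htdef]
        exact (congrArg (fun x => x.2.2) hE).symm
    · rw [hgd, if_neg (fun hcond => hf hcond.2)]
      apply outerA_none
      intro e ivs hm i f hmi hc
      obtain ⟨_, hE⟩ := hloc i f e (flat_of_grouped estadosA e ivs i f hm hmi) hc.1 hc.2
      apply hf
      rw [hE]
      exact hc.2
  · rw [if_neg (fun hcond => hk hcond.1)]
    apply outerA_none
    intro e ivs hm i f hmi hc
    obtain ⟨hkpos, _⟩ := hloc i f e (flat_of_grouped estadosA e ivs i f hm hmi) hc.1 hc.2
    exact hk hkpos

-- ===== VERDICT (by name: the statement is the Claim_ definition above) =====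
theorem identificar_estado_spec : Claim_equal_identificar_estado := by
  intro placa _
  unfold Spec_identificar_estado
  exact core placa
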